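-- pv_equiv track=rewrite | github.com/hyprchs/hyprfen | src/hyprfen/bitops.py | pdep
-- ===== SOURCE A (Python) =====
-- def pdep(value: int, mask: int) -> int:
--     """Software implementation of BMI2 PDEP.
--
--     Deposits the low bits of ``value`` into the bit positions selected by
--     ``mask`` in increasing mask-bit order.
--     """
--     out = 0
--     in_bit = 1
--     while mask:
--         lsb = mask & -mask
--         if value & in_bit:
--             out |= lsb
--         mask ^= lsb
--         in_bit <<= 1
--     return out
-- ===== SOURCE B (Python) =====
-- def pdep(value: int, mask: int) -> int:
--     """Recursive PDEP: peel the mask's low bit, consuming one value bit per set mask bit."""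
--     if mask <= 0:
--         return 0
--     if mask & 1:
--         return (value & 1) | (pdep(value >> 1, mask >> 1) << 1)
--     return pdep(value, mask >> 1) << 1
-- ===== Notes on version B (the rewrite author's own statement) =====
-- stated objective: alternative
-- what changed: Replaces the iterative isolate-lowest-set-bit loop (mask & -mask, xor-clearing, shifting an in_bit probe) by a structural recursion that peels the mask's low bit, consuming one value bit whenever the mask bit is set.
-- outside the precondition, e.g. on pdep(1, -2): A does not finish within the time limit, B returns 0
import Mathlib
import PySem

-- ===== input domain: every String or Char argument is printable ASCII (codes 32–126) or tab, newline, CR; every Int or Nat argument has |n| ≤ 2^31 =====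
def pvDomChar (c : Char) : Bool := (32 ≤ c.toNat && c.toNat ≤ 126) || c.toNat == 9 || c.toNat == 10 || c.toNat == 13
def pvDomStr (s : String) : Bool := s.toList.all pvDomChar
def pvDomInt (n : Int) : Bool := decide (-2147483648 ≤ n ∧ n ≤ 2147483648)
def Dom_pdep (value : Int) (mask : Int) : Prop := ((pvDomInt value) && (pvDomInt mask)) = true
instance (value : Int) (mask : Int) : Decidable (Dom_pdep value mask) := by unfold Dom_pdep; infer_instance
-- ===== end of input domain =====

-- B replaces A's isolate-lowest-set-bit loop by a recursion peeling the mask's low bit; return values agree for mask ≥ 0 (A never terminates on a negative mask).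

-- ===== PORT A =====
-- `while mask:` ported with fuel, one unit per iteration.  On the inputs admitted by
-- Pre_ (mask ≥ 0) each iteration strictly decreases the mask, so fuel mask.toNat + 1
-- is never exhausted there (established in the lemmas below).
def pdepLoop : Nat → Int → Int → Int → Int → Int
  | 0, _, out, _, _ => out
  | fuel + 1, value, out, in_bit, mask =>
    if mask ≠ 0 then
      let lsb := PySem.Int.band mask (-mask)
      let out' := if PySem.Int.band value in_bit ≠ 0 then PySem.Int.bor out lsb else out
      pdepLoop fuel value out' (in_bit <<< (1 : Nat)) (PySem.Int.bxor mask lsb)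
    else out

def pdep (value : Int) (mask : Int) : Int :=
  pdepLoop (mask.toNat + 1) value 0 1 mask

-- ===== PORT B =====
-- Source B's recursion, with a fuel argument that only makes it total: the recursion
-- halves a positive mask each call, so fuel mask.toNat + 1 is never exhausted
-- (established in the lemmas below).
def pdepAltGo : Nat → Int → Int → Int
  | 0, _, _ => 0
  | fuel + 1, value, mask =>
    if mask ≤ 0 then 0
    else if PySem.Int.band mask 1 ≠ 0 then
      PySem.Int.bor (PySem.Int.band value 1)
        ((pdepAltGo fuel (value >>> (1 : Nat)) (mask >>> (1 : Nat))) <<< (1 : Nat))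
    else (pdepAltGo fuel value (mask >>> (1 : Nat))) <<< (1 : Nat)

def pdep_alt (value : Int) (mask : Int) : Int :=
  pdepAltGo (mask.toNat + 1) value mask

-- ===== PRECONDITION & SPEC =====
-- Pre_ excludes negative masks: there A's `while mask:` never terminates (clearing the
-- lowest set bit keeps a negative mask negative), so A returns exactly when mask ≥ 0.
def Pre_pdep (value : Int) (mask : Int) : Prop := 0 ≤ mask
instance (value : Int) (mask : Int) : Decidable (Pre_pdep value mask) := by unfold Pre_pdep; infer_instance
def pvWitness_pdep : Int × Int := (5, 9)

def Spec_pdep (value : Int) (mask : Int) (out : Int) : Prop := out = pdep_alt value mask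
instance (value : Int) (mask : Int) (out : Int) : Decidable (Spec_pdep value mask out) := by unfold Spec_pdep; infer_instance

-- ===== CLAIM (what is proved, stated in full; the proofs are below) =====
def Claim_equal_pdep : Prop := ∀ (value : Int) (mask : Int), Dom_pdep value mask → Pre_pdep value mask → Spec_pdep value mask (pdep value mask)

-- ===== LEMMAS AND PROOFS =====

-- bit k of value in Python's infinite two's complement, arithmetically
def bitI (v : Int) (k : Nat) : Bool := decide ((v / 2 ^ k) % 2 = 1)

-- reference deposit function over Nat masks: bits k, k+1, … of v go to the set bits of m, low to high
def depos (v : Int) (m : Nat) (k : Nat) : Nat :=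
  if hm : m = 0 then 0
  else if m % 2 = 1 then (if bitI v k then 1 else 0) + 2 * depos v (m / 2) (k + 1)
  else 2 * depos v (m / 2) k
termination_by m
decreasing_by all_goals omega

-- ---- Nat bitwise identities (by testBit extensionality) ----

theorem lor_low (b x : Nat) (hb : b ≤ 1) : b ||| 2 * x = 2 * x + b := by
  apply Nat.eq_of_testBit_eq
  intro i
  cases i with
  | zero =>
    rw [Nat.testBit_or]
    have h1 : (2 * x) % 2 = 0 := by omega
    have h2 : (2 * x + b) % 2 = b := by omega
    simp only [Nat.testBit_zero, h1, h2]
    rcases (by omega : b = 0 ∨ b = 1) with h | h <;> simp [h]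
  | succ i =>
    rw [Nat.testBit_or]
    have h1 : b / 2 = 0 := by omega
    have h2 : (2 * x) / 2 = x := by omega
    have h3 : (2 * x + b) / 2 = x := by omega
    simp [Nat.testBit_add_one, h1, h2, h3]

theorem lor_double (a b : Nat) : 2 * a ||| 2 * b = 2 * (a ||| b) := by
  apply Nat.eq_of_testBit_eq
  intro i
  cases i with
  | zero =>
    rw [Nat.testBit_or]
    have h1 : (2 * a) % 2 = 0 := by omega
    have h2 : (2 * b) % 2 = 0 := by omega
    have h3 : (2 * (a ||| b)) % 2 = 0 := by omega
    simp [Nat.testBit_zero, h1, h2, h3]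
  | succ i =>
    rw [Nat.testBit_or]
    have h1 : (2 * a) / 2 = a := by omega
    have h2 : (2 * b) / 2 = b := by omega
    have h3 : (2 * (a ||| b)) / 2 = a ||| b := by omega
    simp [Nat.testBit_add_one, h1, h2, h3, Nat.testBit_or]

theorem xor_double (a b : Nat) : 2 * a ^^^ 2 * b = 2 * (a ^^^ b) := by
  apply Nat.eq_of_testBit_eq
  intro i
  cases i with
  | zero =>
    rw [Nat.testBit_xor]
    have h1 : (2 * a) % 2 = 0 := by omega
    have h2 : (2 * b) % 2 = 0 := by omega
    have h3 : (2 * (a ^^^ b)) % 2 = 0 := by omega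
    simp [Nat.testBit_zero, h1, h2, h3]
  | succ i =>
    rw [Nat.testBit_xor]
    have h1 : (2 * a) / 2 = a := by omega
    have h2 : (2 * b) / 2 = b := by omega
    have h3 : (2 * (a ^^^ b)) / 2 = a ^^^ b := by omega
    simp [Nat.testBit_add_one, h1, h2, h3, Nat.testBit_xor]

theorem xor_one_of_odd (m : Nat) (h : m % 2 = 1) : m ^^^ 1 = m - 1 := by
  apply Nat.eq_of_testBit_eq
  intro i
  cases i with
  | zero =>
    rw [Nat.testBit_xor]
    have h2 : (m - 1) % 2 = 0 := by omega
    simp [Nat.testBit_zero, h, h2]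
  | succ i =>
    rw [Nat.testBit_xor]
    have h1 : (1 : Nat) / 2 = 0 := by omega
    have h2 : (m - 1) / 2 = m / 2 := by omega
    simp [Nat.testBit_add_one, h1, h2]

theorem and_pred_of_odd (m : Nat) (h : m % 2 = 1) : m &&& (m - 1) = m - 1 := by
  apply Nat.eq_of_testBit_eq
  intro i
  cases i with
  | zero =>
    rw [Nat.testBit_and]
    have h2 : (m - 1) % 2 = 0 := by omega
    simp [Nat.testBit_zero, h, h2]
  | succ i =>
    rw [Nat.testBit_and]
    have h2 : (m - 1) / 2 = m / 2 := by omega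
    simp [Nat.testBit_add_one, h2]

theorem and_pred_of_even (m : Nat) (h : m % 2 = 0) (hm : 0 < m) :
    m &&& (m - 1) = 2 * ((m / 2) &&& (m / 2 - 1)) := by
  apply Nat.eq_of_testBit_eq
  intro i
  cases i with
  | zero =>
    rw [Nat.testBit_and]
    have h3 : (2 * ((m / 2) &&& (m / 2 - 1))) % 2 = 0 := by omega
    simp [Nat.testBit_zero, h, h3]
  | succ i =>
    rw [Nat.testBit_and]
    have h1 : (m - 1) / 2 = m / 2 - 1 := by omega
    have h3 : (2 * ((m / 2) &&& (m / 2 - 1))) / 2 = (m / 2) &&& (m / 2 - 1) := by omega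
    simp [Nat.testBit_add_one, h1, h3, Nat.testBit_and]

-- clearing the lowest set bit: m ^^^ (m - (m &&& (m-1))) = m &&& (m-1)
theorem xor_lowbit (m : Nat) (hm : 0 < m) :
    m ^^^ (m - (m &&& (m - 1))) = m &&& (m - 1) := by
  induction m using Nat.strong_induction_on with
  | _ m ih =>
    rcases Nat.even_or_odd m with he | ho
    · have h0 : m % 2 = 0 := Nat.even_iff.mp he
      have hz : 0 < m / 2 := by omega
      have hle : (m / 2) &&& (m / 2 - 1) ≤ m / 2 - 1 := Nat.and_le_right
      have hiv := ih (m / 2) (by omega) hz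
      have hp := and_pred_of_even m h0 hm
      rw [hp]
      have hm2 : m = 2 * (m / 2) := by omega
      have hsub : m - 2 * ((m / 2) &&& (m / 2 - 1)) = 2 * ((m / 2) - ((m / 2) &&& (m / 2 - 1))) := by omega
      rw [hsub]
      calc m ^^^ 2 * ((m / 2) - ((m / 2) &&& (m / 2 - 1)))
          = 2 * (m / 2) ^^^ 2 * ((m / 2) - ((m / 2) &&& (m / 2 - 1))) := by rw [← hm2]
        _ = 2 * ((m / 2) ^^^ ((m / 2) - ((m / 2) &&& (m / 2 - 1)))) := xor_double _ _
        _ = 2 * ((m / 2) &&& (m / 2 - 1)) := by rw [hiv]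
    · have h1 : m % 2 = 1 := Nat.odd_iff.mp ho
      have hp := and_pred_of_odd m h1
      rw [hp]
      have : m - (m - 1) = 1 := by omega
      rw [this]
      exact xor_one_of_odd m h1

-- ---- Int-side bridges ----

theorem shiftRight_one_eq (v : Int) : v >>> (1 : Nat) = v / 2 := by
  rw [Int.shiftRight_eq_div_pow]; norm_num

theorem shiftRight_shiftRight_one (v : Int) (k : Nat) :
    (v >>> (k : Nat)) >>> (1 : Nat) = v >>> (k + 1 : Nat) := by
  rw [shiftRight_one_eq, Int.shiftRight_eq_div_pow, Int.shiftRight_eq_div_pow]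
  rw [Int.ediv_ediv_of_nonneg (by positivity)]
  congr 1

theorem shiftRight_zero_eq (v : Int) : v >>> (0 : Nat) = v := by
  rw [Int.shiftRight_eq_div_pow]; norm_num

theorem one_shiftLeft_eq (k : Nat) : (1 : Int) <<< k = ((2 ^ k : Nat) : Int) := by
  rw [Int.shiftLeft_eq]; push_cast; ring

theorem fmod_two_eq (a : Int) : PySem.Int.mod a 2 = a % 2 := by
  simp [PySem.Int.mod, Int.fmod_eq_emod]

theorem mod_shiftRight_eq_bitI (v : Int) (k : Nat) :
    PySem.Int.mod (v >>> (k : Nat)) 2 = if bitI v k then 1 else 0 := by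
  rw [fmod_two_eq, Int.shiftRight_eq_div_pow]
  unfold bitI
  rw [show ((2 ^ k : Nat) : Int) = (2:Int) ^ k by push_cast; ring]
  set a : Int := v / (2:Int) ^ k with ha
  have h0 : (0 : Int) ≤ a % 2 := Int.emod_nonneg _ (by omega)
  have h1 : a % 2 < 2 := Int.emod_lt_of_pos _ (by omega)
  split_ifs with h
  · simp only [decide_eq_true_eq] at h
    omega
  · simp only [decide_eq_true_eq] at h
    omega

-- floor division of a negative two's-complement number by a power of two
theorem neg_ediv_pow (w : Nat) (k : Nat) :
    ((-(w : Int) - 1) / (2 ^ k : Nat)) = -((w / 2 ^ k : Nat) : Int) - 1 := by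
  have hdecomp : (-(w : Int) - 1) = ((2 ^ k : Nat) : Int) - ((w % 2 ^ k : Nat) : Int) - 1
      + (-((w / 2 ^ k : Nat) : Int) - 1) * ((2 ^ k : Nat) : Int) := by
    push_cast
    nlinarith [Nat.div_add_mod w (2 ^ k)]
  rw [hdecomp, Int.add_mul_ediv_right _ _ (by positivity)]
  have hlt : ((w % 2 ^ k : Nat) : Int) < ((2 ^ k : Nat) : Int) := by
    exact_mod_cast Nat.mod_lt _ (by positivity)
  have hz : (((2 ^ k : Nat) : Int) - ((w % 2 ^ k : Nat) : Int) - 1) / ((2 ^ k : Nat) : Int) = 0 := by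
    apply Int.ediv_eq_zero_of_lt
    · have : (0 : Int) ≤ ((w % 2 ^ k : Nat) : Int) := by positivity
      omega
    · omega
  rw [hz]; ring

theorem bitI_natCast (w : Nat) (k : Nat) : bitI (w : Int) k = w.testBit k := by
  induction k generalizing w with
  | zero =>
    simp only [bitI, Nat.testBit_zero, pow_zero, Int.ediv_one]
    rcases (by omega : w % 2 = 0 ∨ w % 2 = 1) with h | h <;> simp [h] <;> omega
  | succ k ih =>
    have hstep : bitI (w : Int) (k + 1) = bitI ((w / 2 : Nat) : Int) k := by
      unfold bitI
      rw [show ((2:Int) ^ (k+1)) = 2 * 2 ^ k by ring]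
      rw [← Int.ediv_ediv_of_nonneg (by omega : (0:Int) ≤ 2)]
      rw [show ((w : Int) / 2) = ((w / 2 : Nat) : Int) by exact_mod_cast (Int.natCast_div w 2).symm]
    rw [hstep, ih, Nat.testBit_add_one]

theorem bitI_neg (w : Nat) (k : Nat) : bitI (-(w : Int) - 1) k = !(w.testBit k) := by
  unfold bitI
  rw [show ((2:Int) ^ k) = ((2 ^ k : Nat) : Int) by push_cast; ring]
  rw [neg_ediv_pow]
  have ht : w.testBit k = decide (((w / 2 ^ k : Nat) : Int) % 2 = 1) := by
    rw [← bitI_natCast w k]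
    unfold bitI
    rw [show ((2:Int) ^ k) = ((2 ^ k : Nat) : Int) by push_cast; ring]
    rw [show ((w : Int) / ((2 ^ k : Nat) : Int)) = ((w / 2 ^ k : Nat) : Int) by
      exact_mod_cast (Int.natCast_div w (2 ^ k)).symm]
  rw [ht]
  cases hb : decide (((w / 2 ^ k : Nat) : Int) % 2 = 1) <;> simp at hb ⊢ <;> omega

-- band v (1 <<< k) is zero iff bit k of v is clear
theorem band_pow_ne_zero_iff (v : Int) (k : Nat) :
    (PySem.Int.band v ((1 : Int) <<< k) ≠ 0) ↔ bitI v k = true := by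
  rw [one_shiftLeft_eq]
  have hp : 0 < 2 ^ k := Nat.two_pow_pos k
  by_cases hv : 0 ≤ v
  · rw [PySem.Int.band_of_nonneg hv (by exact_mod_cast Nat.zero_le _)]
    rw [show ((((2 ^ k : Nat) : Int)).toNat) = 2 ^ k from Int.toNat_natCast _]
    rw [Nat.and_two_pow]
    have hbit : bitI v k = v.toNat.testBit k := by
      conv_lhs => rw [show v = ((v.toNat : Nat) : Int) from (Int.toNat_of_nonneg hv).symm]
      exact bitI_natCast _ _
    rw [hbit]
    cases h : v.toNat.testBit k <;> simp [h] <;> omega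
  · set w : Nat := (-v - 1).toNat with hwdef
    have hveq : v = -(w : Int) - 1 := by omega
    have hband : PySem.Int.band v (((2 ^ k : Nat) : Int))
        = (((2 ^ k) - ((2 ^ k) &&& w) : Nat) : Int) := by
      unfold PySem.Int.band
      rw [if_neg hv, if_pos (by exact_mod_cast Nat.zero_le _)]
      rw [Int.toNat_natCast]
    have hbit : bitI v k = !(w.testBit k) := by
      rw [hveq]; exact bitI_neg w k
    rw [hband, hbit, Nat.two_pow_and]
    cases h : w.testBit k <;> simp [h] <;> omega

-- lsb of a positive mask, as Nat arithmetic
theorem band_neg_self (m : Nat) (hm : 0 < m) :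
    PySem.Int.band (m : Int) (-(m : Int)) = ((m - (m &&& (m - 1)) : Nat) : Int) := by
  unfold PySem.Int.band
  rw [if_pos (by positivity), if_neg (by omega)]
  rw [Int.toNat_natCast]
  congr 2
  rw [show (-(-(m : Int)) - 1) = ((m - 1 : Nat) : Int) by push_cast <;> omega]
  rw [Int.toNat_natCast]

theorem depos_zero (v : Int) (k : Nat) : depos v 0 k = 0 := by
  rw [depos.eq_def]; simp

theorem depos_even (v : Int) (n : Nat) (h : n % 2 = 0) (k : Nat) :
    depos v n k = 2 * depos v (n / 2) k := by
  by_cases hn : n = 0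
  · subst hn; simp [depos_zero]
  · rw [depos.eq_def, dif_neg hn, if_neg (by omega)]

-- ---- relating pdep_alt to depos ----

theorem pdepAltGo_eq (fuel : Nat) : ∀ (m : Nat), m < fuel → ∀ (v : Int) (k : Nat),
    pdepAltGo fuel (v >>> (k : Nat)) (m : Int) = ((depos v m k : Nat) : Int) := by
  induction fuel with
  | zero => intro m hm; omega
  | succ fuel ih =>
    intro m hm v k
    rw [show pdepAltGo (fuel + 1) (v >>> (k : Nat)) (m : Int) =
        (if (m : Int) ≤ 0 then 0
         else if PySem.Int.band (m : Int) 1 ≠ 0 then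
           PySem.Int.bor (PySem.Int.band (v >>> (k : Nat)) 1)
             ((pdepAltGo fuel ((v >>> (k : Nat)) >>> (1 : Nat)) ((m : Int) >>> (1 : Nat))) <<< (1 : Nat))
         else (pdepAltGo fuel (v >>> (k : Nat)) ((m : Int) >>> (1 : Nat))) <<< (1 : Nat)) from rfl]
    by_cases hm0 : m = 0
    · subst hm0
      simp [depos_zero]
    · rw [if_neg (show ¬ ((m : Int) ≤ 0) by exact_mod_cast by omega)]
      rw [PySem.Int.band_one, fmod_two_eq]
      rw [show ((m : Int) % 2) = ((m % 2 : Nat) : Int) by push_cast; ring]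
      rw [show ((m : Int) >>> (1 : Nat)) = ((m / 2 : Nat) : Int) by
        rw [shiftRight_one_eq]; exact_mod_cast (Int.natCast_div m 2).symm]
      rcases (by omega : m % 2 = 0 ∨ m % 2 = 1) with hpar | hpar
      · rw [hpar, if_neg (by simp)]
        rw [ih (m / 2) (by omega) v k]
        rw [Int.shiftLeft_eq, depos_even v m hpar k]
        push_cast
        ring
      · rw [hpar, if_pos (by simp)]
        rw [PySem.Int.band_one, mod_shiftRight_eq_bitI v k]
        rw [shiftRight_shiftRight_one v k]
        rw [ih (m / 2) (by omega) v (k + 1)]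
        conv_rhs => rw [depos.eq_def]
        rw [dif_neg hm0, if_pos hpar]
        by_cases hb : bitI v k
        · rw [if_pos hb, if_pos hb]
          rw [show (1 : Int) = ((1 : Nat) : Int) from rfl]
          rw [show ((((depos v (m / 2) (k + 1) : Nat) : Int)) <<< (1 : Nat))
              = ((2 * depos v (m / 2) (k + 1) : Nat) : Int) by
            rw [Int.shiftLeft_eq]; push_cast; ring]
          rw [PySem.Int.bor_natCast]
          rw [lor_low 1 (depos v (m / 2) (k + 1)) (by omega)]
          push_cast; ring
        · rw [if_neg hb, if_neg hb]
          rw [show (0 : Int) = ((0 : Nat) : Int) from rfl]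
          rw [show ((((depos v (m / 2) (k + 1) : Nat) : Int)) <<< (1 : Nat))
              = ((2 * depos v (m / 2) (k + 1) : Nat) : Int) by
            rw [Int.shiftLeft_eq]; push_cast; ring]
          rw [PySem.Int.bor_natCast]
          simp

-- KEY: lowbit recurrence for depos
theorem depos_lowbit (m : Nat) (hm : 0 < m) : ∀ (v : Int) (k : Nat),
    depos v m k = (if bitI v k then m - (m &&& (m - 1)) else 0) ||| depos v (m &&& (m - 1)) (k + 1) := by
  induction m using Nat.strong_induction_on with
  | _ m ih =>
    intro v k
    rcases (by omega : m % 2 = 1 ∨ m % 2 = 0) with hpar | hpar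
    · rw [and_pred_of_odd m hpar]
      rw [show m - (m - 1) = 1 by omega]
      rw [depos.eq_def, dif_neg (show ¬ m = 0 by omega), if_pos hpar]
      rw [depos_even v (m - 1) (by omega) (k + 1)]
      rw [show (m - 1) / 2 = m / 2 by omega]
      rw [show ((if bitI v k then 1 else 0) ||| 2 * depos v (m / 2) (k + 1)) =
          2 * depos v (m / 2) (k + 1) + (if bitI v k then 1 else 0) from
        lor_low _ _ (by split <;> omega)]
      omega
    · have hz : 0 < m / 2 := by omega
      have hle : (m / 2) &&& (m / 2 - 1) ≤ m / 2 - 1 := Nat.and_le_right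
      rw [and_pred_of_even m hpar hm]
      rw [depos_even v m hpar k]
      rw [ih (m / 2) (by omega) hz v k]
      rw [depos_even v (2 * ((m / 2) &&& (m / 2 - 1))) (by omega) (k + 1)]
      rw [show 2 * ((m / 2) &&& (m / 2 - 1)) / 2 = (m / 2) &&& (m / 2 - 1) by omega]
      rw [show m - 2 * ((m / 2) &&& (m / 2 - 1)) = 2 * (m / 2 - ((m / 2) &&& (m / 2 - 1))) by omega]
      rw [show (if bitI v k then 2 * (m / 2 - ((m / 2) &&& (m / 2 - 1))) else 0) =
          2 * (if bitI v k then m / 2 - ((m / 2) &&& (m / 2 - 1)) else 0) by split <;> omega]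
      rw [lor_double]

-- ---- the A loop ----

theorem pdepLoop_eq (fuel : Nat) : ∀ (m : Nat), m < fuel → ∀ (v : Int) (k : Nat) (o : Nat),
    pdepLoop fuel v (o : Int) ((1 : Int) <<< k) (m : Int) = ((o ||| depos v m k : Nat) : Int) := by
  induction fuel with
  | zero => intro m hm; omega
  | succ fuel ih =>
    intro m hm v k o
    by_cases hm0 : m = 0
    · subst hm0
      simp [pdepLoop, depos_zero]
    · rw [show pdepLoop (fuel + 1) v (o : Int) ((1 : Int) <<< k) (m : Int) =
          (if (m : Int) ≠ 0 then
            pdepLoop fuel v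
              (if PySem.Int.band v ((1 : Int) <<< k) ≠ 0 then PySem.Int.bor (o : Int) (PySem.Int.band (m : Int) (-(m : Int))) else (o : Int))
              (((1 : Int) <<< k) <<< (1 : Nat)) (PySem.Int.bxor (m : Int) (PySem.Int.band (m : Int) (-(m : Int))))
          else (o : Int)) from rfl]
      rw [if_pos (by exact_mod_cast by omega)]
      have hmpos : 0 < m := by omega
      rw [band_neg_self m hmpos]
      have hxor : PySem.Int.bxor (m : Int) ((m - (m &&& (m - 1)) : Nat) : Int)
          = ((m &&& (m - 1) : Nat) : Int) := by
        rw [PySem.Int.bxor_natCast, xor_lowbit m hmpos]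
      rw [hxor]
      rw [show ((1 : Int) <<< k) <<< (1 : Nat) = (1 : Int) <<< (k + 1) from (Int.shiftLeft_add 1 k 1).symm]
      have hlt : m &&& (m - 1) < fuel := by
        have : m &&& (m - 1) ≤ m - 1 := Nat.and_le_right
        omega
      by_cases hbit : bitI v k
      · rw [if_pos ((band_pow_ne_zero_iff v k).mpr hbit)]
        rw [PySem.Int.bor_natCast]
        rw [ih (m &&& (m - 1)) hlt v (k + 1) (o ||| (m - (m &&& (m - 1))))]
        rw [depos_lowbit m hmpos v k, if_pos hbit]
        rw [Nat.lor_assoc]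
      · rw [if_neg (by rw [band_pow_ne_zero_iff]; simp [hbit])]
        rw [ih (m &&& (m - 1)) hlt v (k + 1) o]
        rw [depos_lowbit m hmpos v k, if_neg (by simp [hbit])]
        simp

-- ===== VERDICT (by name: the statement is the Claim_ definition above) =====
theorem pdep_spec : Claim_equal_pdep := by
  intro value mask hdom hpre
  unfold Spec_pdep
  have hmask : mask = ((mask.toNat : Nat) : Int) := (Int.toNat_of_nonneg hpre).symm
  have hA : pdep value mask = ((depos value mask.toNat 0 : Nat) : Int) := by
    unfold pdep
    rw [hmask]
    rw [show ((((mask.toNat : Nat) : Int)).toNat) = mask.toNat from Int.toNat_natCast _]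
    rw [show (0 : Int) = ((0 : Nat) : Int) from rfl]
    rw [show (1 : Int) = (1 : Int) <<< (0 : Nat) from by rw [Int.shiftLeft_eq]; norm_num]
    rw [pdepLoop_eq (mask.toNat + 1) mask.toNat (by omega) value 0 0]
    simp
  have hB : pdep_alt value mask = ((depos value mask.toNat 0 : Nat) : Int) := by
    calc pdep_alt value mask
        = pdepAltGo (mask.toNat + 1) (value >>> (0 : Nat)) ((mask.toNat : Nat) : Int) := by
          rw [shiftRight_zero_eq, ← hmask]; rfl
      _ = _ := pdepAltGo_eq (mask.toNat + 1) mask.toNat (by omega) value 0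
  rw [hA, hB]
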